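-- pv_equiv track=rewrite | github.com/yongjae94/New_Reportbank | backend/api/psr_flow.py | _extract_note_value
-- ===== SOURCE A (Python) =====
-- def _extract_note_value(notes: str | None, key: str) -> str | None:
--     if not notes:
--         return None
--     token = f"{key}="
--     for chunk in notes.split(";"):
--         part = chunk.strip()
--         if part.startswith(token):
--             value = part[len(token) :].strip()
--             return value or None
--     return None
-- ===== SOURCE B (Python) =====
-- def _extract_note_value(notes: str | None, key: str) -> str | None:
--     if not notes:
--         return None
--     table = {}
--     for chunk in notes.split(";"):
--         part = chunk.strip()
--         i = part.find("=")
--         if i >= 0: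
--             table.setdefault(part[:i], part[i + 1:])
--     if key in table:
--         return table[key].strip() or None
--     return None
-- ===== Notes on version B (the rewrite author's own statement) =====
-- stated objective: idiomatic
-- what changed: B replaces A's early-exit prefix scan with a parse-into-table pass: it splits the notes once, records each 'k=v' chunk (split at the first '=') into a dict with setdefault so the first occurrence wins, and then answers by a single dict lookup.
-- outside the precondition, e.g. on _extract_note_value('a=b=c', 'a=b'): A returns 'c', B returns None
import Mathlib
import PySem

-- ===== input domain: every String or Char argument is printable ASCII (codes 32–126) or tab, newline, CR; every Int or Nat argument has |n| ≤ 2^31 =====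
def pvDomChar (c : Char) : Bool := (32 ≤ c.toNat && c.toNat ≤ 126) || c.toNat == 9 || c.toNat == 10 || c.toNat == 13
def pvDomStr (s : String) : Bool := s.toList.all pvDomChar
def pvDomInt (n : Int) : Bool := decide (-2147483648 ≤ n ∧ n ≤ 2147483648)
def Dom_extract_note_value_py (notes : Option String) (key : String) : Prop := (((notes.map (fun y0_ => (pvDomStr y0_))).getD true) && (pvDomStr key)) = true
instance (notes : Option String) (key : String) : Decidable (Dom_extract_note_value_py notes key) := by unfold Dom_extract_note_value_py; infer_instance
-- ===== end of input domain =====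

-- B parses the notes once into a first-occurrence-wins table and answers by one lookup,
-- instead of A's early-exit prefix scan (idiomatic parse-then-lookup; no speed claim).

-- ===== PORT A =====
-- the for-loop of A with its early returns, as structural recursion over the chunk list
def pvALoop (token : String) : List String → Option String
  | [] => none
  | chunk :: rest =>
    let part := PySem.Str.strip chunk
    if PySem.Str.startswith part token then
      let value := PySem.Str.strip (PySem.Str.slice part (some (PySem.Str.len token)) none)
      if value = "" then none else some value          -- `return value or None`
    else pvALoop token rest

def extract_note_value_py (notes : Option String) (key : String) : Option String :=
  match notes with
  | none => none                                       -- `if not notes: return None` (None case)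
  | some s =>
    if s = "" then none                                -- `if not notes` (empty-string case)
    else
      let token := key ++ "="                          -- f"{key}="
      match PySem.Str.split? s ";" with                -- notes.split(";"); none only for sep = "", unreachable here
      | none => none
      | some chunks => pvALoop token chunks

-- ===== PORT B =====
-- one iteration of B's table-building loop
def pvBStep (d : PySem.Dict String String) (chunk : String) : PySem.Dict String String :=
  let part := PySem.Str.strip chunk
  let i := PySem.Str.find part "="                     -- part.find("=")
  if 0 ≤ i then                                        -- `if i >= 0`
    d.setdefault (PySem.Str.slice part none (some i)) (PySem.Str.slice part (some (i + 1)) none)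
  else d

def extract_note_value_py_alt (notes : Option String) (key : String) : Option String :=
  match notes with
  | none => none                                       -- `if not notes: return None`
  | some s =>
    if s = "" then none
    else
      match PySem.Str.split? s ";" with                -- notes.split(";"); sep ≠ "" so never none
      | none => none
      | some chunks =>
        let table := chunks.foldl pvBStep PySem.Dict.empty
        match table.get? key with                      -- `if key in table: … table[key] …`
        | some v =>
          let r := PySem.Str.strip v
          if r = "" then none else some r              -- `return table[key].strip() or None`
        | none => none

-- ===== PRECONDITION & SPEC =====
-- Pre_ excludes keys that themselves contain '=' (A still returns there): on such keys the
-- 'key=value' grammar is ambiguous — A's raw prefix match can hit a chunk whose first '='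
-- comes earlier, while B's table is keyed by the text before the first '='; both readings of
-- such malformed keys are defensible.
def Pre_extract_note_value_py (notes : Option String) (key : String) : Prop :=
  PySem.Str.isIn "=" key = false
instance (notes : Option String) (key : String) : Decidable (Pre_extract_note_value_py notes key) := by
  unfold Pre_extract_note_value_py; infer_instance

def pvWitness_extract_note_value_py : Option String × String := (some "a=1; b=2", "a")

def Spec_extract_note_value_py (notes : Option String) (key : String) (out : Option String) : Prop :=
  out = extract_note_value_py_alt notes key
instance (notes : Option String) (key : String) (out : Option String) : Decidable (Spec_extract_note_value_py notes key out) := by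
  unfold Spec_extract_note_value_py; infer_instance

-- ===== CLAIM (what is proved, stated in full; the proofs are below) =====
def Claim_equal_extract_note_value_py : Prop := ∀ (notes : Option String) (key : String), Dom_extract_note_value_py notes key → Pre_extract_note_value_py notes key → Spec_extract_note_value_py notes key (extract_note_value_py notes key)

-- ===== LEMMAS AND PROOFS =====

-- the raw (pre-strip) value found by A's scan
def pvRawFirst (token : String) : List String → Option String
  | [] => none
  | chunk :: rest =>
    let part := PySem.Str.strip chunk
    if PySem.Str.startswith part token then
      some (PySem.Str.slice part (some (PySem.Str.len token)) none)
    else pvRawFirst token rest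

-- B's post-processing of the looked-up value
def pvFin : Option String → Option String
  | none => none
  | some v => let r := PySem.Str.strip v; if r = "" then none else some r

theorem pvALoop_eq_fin_rawFirst (token : String) (cs : List String) :
    pvALoop token cs = pvFin (pvRawFirst token cs) := by
  induction cs with
  | nil => rfl
  | cons c rest ih =>
    simp only [pvALoop, pvRawFirst]
    split
    · simp [pvFin]
    · simp [ih]

theorem pv_singleton_infix {a : Char} {l : List Char} : [a] <:+: l ↔ a ∈ l := by
  constructor
  · intro h; exact h.mem (List.mem_singleton_self a)
  · intro h
    obtain ⟨s, t, rfl⟩ := List.append_of_mem h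
    exact ⟨s, t, by simp⟩

-- if part starts with key ++ "=", its first '=' sits right after key,
-- part[:i] is key and part[i+1:] is part[len(token):]
theorem pv_match_case (key part : String)
    (hkey : PySem.Str.isIn "=" key = false)
    (hsw : PySem.Str.startswith part (key ++ "=") = true) :
    PySem.Str.find part "=" = (key.toList.length : Int) ∧
    PySem.Str.slice part none (some (PySem.Str.find part "=")) = key ∧
    PySem.Str.slice part (some (PySem.Str.find part "=" + 1)) none =
      PySem.Str.slice part (some (PySem.Str.len (key ++ "="))) none := by
  have hkeyne : ('=' : Char) ∉ key.toList := by
    have heql : ("=" : String).toList = ['='] := by decide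
    have := (PySem.Chars.isIn_eq_false_iff "=".toList key.toList).mp (by simpa using hkey)
    rw [heql] at this
    intro hm; exact this (pv_singleton_infix.mpr hm)
  have hpre : (key.toList ++ ['=']) <+: part.toList := by
    have := (PySem.Chars.startswith_iff part.toList (key ++ "=").toList).mp (by simpa using hsw)
    simpa using this
  obtain ⟨r, hr⟩ := hpre
  have hpart : part.toList = key.toList ++ '=' :: r := by
    rw [← hr]; simp
  -- find part "=" = key.length
  have hfind' : PySem.Str.find part "=" = (key.toList.length : Int) := by
    rw [PySem.Str.find_eq]
    have hnonneg : 0 ≤ PySem.Chars.find part.toList "=".toList := by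
      rw [PySem.Chars.find_nonneg_iff]
      have heql : ("=" : String).toList = ['='] := by decide
      rw [heql]
      exact pv_singleton_infix.mpr (by rw [hpart]; simp)
    obtain ⟨hat, hmin⟩ := PySem.Chars.find_spec hnonneg
    set f := (PySem.Chars.find part.toList "=".toList).toNat with hf
    have hkeylen : "=".toList <+: part.toList.drop key.toList.length := by
      rw [hpart]; simp
    have hnotlt : ¬ f < key.toList.length := by
      intro hlt
      obtain ⟨t, ht⟩ := hat
      have hdropf : part.toList.drop f = '=' :: t := by rw [← ht]; rfl
      have hget : part.toList[f]? = some '=' := by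
        have h0 : (part.toList.drop f)[0]? = some '=' := by rw [hdropf]; rfl
        rw [List.getElem?_drop] at h0; simpa using h0
      rw [hpart, List.getElem?_append_left (by omega)] at hget
      exact hkeyne (List.mem_of_getElem? hget)
    have hnotgt : ¬ key.toList.length < f := fun hgt => hmin _ hgt hkeylen
    omega
  have hnn : (0:Int) ≤ (key.toList.length : Int) := by positivity
  refine ⟨hfind', ?_, ?_⟩
  · -- part[:find] = key
    apply String.toList_inj.mp
    rw [PySem.Str.toList_slice, PySem.Chars.slice_eq_listSlice, hfind',
      PySem.List.slice_to _ hnn, hpart]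
    simp
  · -- part[find+1:] = part[len(key++"="):]
    apply String.toList_inj.mp
    have hlen : PySem.Str.len (key ++ "=") = (key.toList.length : Int) + 1 := by
      simp [PySem.Str.len_eq]
    rw [PySem.Str.toList_slice, PySem.Str.toList_slice, PySem.Chars.slice_eq_listSlice,
      hfind', hlen, PySem.List.slice_from _ (by positivity),
      PySem.Chars.slice_eq_listSlice, PySem.List.slice_from _ (by positivity)]

-- if part does not start with key ++ "=" but contains '=', the text before the first '=' is not key
theorem pv_miss_case (key part : String)
    (hsw : PySem.Str.startswith part (key ++ "=") = false)
    (hge : 0 ≤ PySem.Str.find part "=") :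
    PySem.Str.slice part none (some (PySem.Str.find part "=")) ≠ key := by
  intro heq
  have hge' : 0 ≤ PySem.Chars.find part.toList "=".toList := by
    rw [PySem.Str.find_eq] at hge; exact hge
  obtain ⟨hat, -⟩ := PySem.Chars.find_spec hge'
  obtain ⟨t, ht⟩ := hat
  set f := (PySem.Chars.find part.toList "=".toList).toNat with hf
  have htake : part.toList.take f = key.toList := by
    have h2 := congrArg String.toList heq
    rw [PySem.Str.toList_slice, PySem.Chars.slice_eq_listSlice,
      PySem.List.slice_to _ hge] at h2
    rw [PySem.Str.find_eq] at h2
    exact h2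
  have hdrop : part.toList.drop f = '=' :: t := by rw [← ht]; rfl
  have hp : (key ++ "=").toList <+: part.toList := by
    refine ⟨t, ?_⟩
    have hsplitp : part.toList = part.toList.take f ++ part.toList.drop f := by simp
    rw [hsplitp, htake, hdrop]; simp
  have : PySem.Str.startswith part (key ++ "=") = true := by
    rw [PySem.Str.startswith_eq]
    exact (PySem.Chars.startswith_iff _ _).mpr hp
  rw [this] at hsw; cases hsw

theorem pv_or_some (x z : Option String) (v : String) : (x.or (some v)).or z = x.or (some v) := by
  cases x <;> rfl

-- one step of B's loop, seen through get? key
theorem pvBStep_get? (key : String) (hkey : PySem.Str.isIn "=" key = false)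
    (d : PySem.Dict String String) (c : String) :
    (pvBStep d c).get? key =
      (d.get? key).or (pvRawFirst (key ++ "=") [c]) := by
  simp only [pvBStep, pvRawFirst]
  by_cases hsw : PySem.Str.startswith (PySem.Str.strip c) (key ++ "=") = true
  · obtain ⟨hfind, hk, hv⟩ := pv_match_case key (PySem.Str.strip c) hkey hsw
    have hge : 0 ≤ PySem.Str.find (PySem.Str.strip c) "=" := by rw [hfind]; positivity
    simp only [hsw, if_pos hge, hk, hv]
    rw [PySem.Dict.get?_setdefault_self]
    cases d.get? key <;> rfl
  · rw [if_neg hsw]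
    by_cases hge : 0 ≤ PySem.Str.find (PySem.Str.strip c) "="
    · rw [if_pos hge]
      rw [PySem.Dict.get?_setdefault_of_ne _ _
        (fun h => pv_miss_case key (PySem.Str.strip c) (by simpa using hsw) hge h.symm)]
      cases d.get? key <;> rfl
    · rw [if_neg hge]
      cases d.get? key <;> rfl

-- B's whole loop, seen through get? key: the table keeps the first raw match
theorem pvFoldl_get? (key : String) (hkey : PySem.Str.isIn "=" key = false)
    (cs : List String) (d : PySem.Dict String String) :
    (cs.foldl pvBStep d).get? key = (d.get? key).or (pvRawFirst (key ++ "=") cs) := by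
  induction cs generalizing d with
  | nil => simp [pvRawFirst]
  | cons c rest ih =>
    rw [List.foldl_cons, ih]
    rw [pvBStep_get? key hkey]
    simp only [pvRawFirst]
    by_cases hsw : PySem.Str.startswith (PySem.Str.strip c) (key ++ "=") = true
    · simp only [hsw, if_pos]
      exact pv_or_some _ _ _
    · simp only [hsw]
      cases d.get? key <;> rfl

-- ===== VERDICT (by name: the statement is the Claim_ definition above) =====
theorem extract_note_value_py_spec : Claim_equal_extract_note_value_py := by
  intro notes key _hdom hpre
  unfold Spec_extract_note_value_py
  unfold extract_note_value_py extract_note_value_py_alt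
  cases notes with
  | none => rfl
  | some s =>
    by_cases hs : s = ""
    · simp [hs]
    · simp only [if_neg hs]
      cases hsplit : PySem.Str.split? s ";" with
      | none => rfl
      | some chunks =>
        simp only
        rw [pvFoldl_get? key hpre chunks PySem.Dict.empty]
        rw [PySem.Dict.get?_empty]
        rw [pvALoop_eq_fin_rawFirst]
        cases pvRawFirst (key ++ "=") chunks <;> rfl
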